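-- pv_equiv track=rewrite | github.com/DammnThatsCrazy/Aether | Agent Layer/agent_controller/dashboard.py | render_kanban
-- ===== SOURCE A (Python) =====
-- from typing import Any
--
-- def _box(title: str, lines: list[str], width: int = 72) -> str:
--     """Render an ASCII box with title and content lines."""
--     border = "+" + "-" * (width - 2) + "+"
--     title_line = f"| {title:<{width - 4}} |"
--     separator = "|" + "-" * (width - 2) + "|"
--     body = []
--     for line in lines:
--         truncated = line[: width - 4]
--         body.append(f"| {truncated:<{width - 4}} |")
--     return "\n".join([border, title_line, separator] + body + [border])
--
-- def _status_icon(status: str) -> str: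
--     icons = {
--         "active": "[+]",
--         "idle": "[~]",
--         "sleeping": "[z]",
--         "blocked": "[!]",
--         "halted": "[X]",
--         "failed": "[F]",
--         "completed": "[*]",
--         "awaiting_review": "[?]",
--         "recovering": "[R]",
--         "pending": "[ ]",
--     }
--     return icons.get(status, "[.]")
--
-- def render_kanban(objectives: list[dict[str, Any]], units_enabled: bool = False) -> str:
--     """Render the kanban/objective board view."""
--     columns = {
--         "OPEN": [],
--         "BLOCKED": [],
--         "REVIEW": [],
--         "SLEEPING": [],
--         "FAILED": [],
--         "DONE": [],
--     }
--     status_map = {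
--         "pending": "OPEN",
--         "planning": "OPEN",
--         "active": "OPEN",
--         "blocked": "BLOCKED",
--         "awaiting_review": "REVIEW",
--         "sleeping": "SLEEPING",
--         "failed": "FAILED",
--         "recovering": "FAILED",
--         "completed": "DONE",
--         "cancelled": "DONE",
--     }
--     for obj in objectives:
--         col = status_map.get(obj.get("status", ""), "OPEN")
--         obj_id = obj.get("objective_id", "")[:8]
--         severity = obj.get("severity", "")
--         goal = obj.get("goal", "")[:30]
--         icon = _status_icon(obj.get("status", ""))
--         entry = f"{icon} {obj_id}.. {severity:<8} {goal}"
--         columns[col].append(entry)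
--
--     lines = []
--     for col_name, entries in columns.items():
--         lines.append(f"  --- {col_name} ({len(entries)}) ---")
--         if entries:
--             for e in entries[:10]:
--                 lines.append(f"    {e}")
--         else:
--             lines.append("    (empty)")
--         lines.append("")
--     return _box("KANBAN / OBJECTIVE BOARD", lines)
-- ===== SOURCE B (Python) =====
-- # Kanban board via one merged status table (icon+column per status), tag-then-filter.
--
-- _STATUS_INFO = {
--     "pending": ("[ ]", "OPEN"),
--     "planning": ("[.]", "OPEN"),
--     "active": ("[+]", "OPEN"),
--     "blocked": ("[!]", "BLOCKED"),
--     "awaiting_review": ("[?]", "REVIEW"),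
--     "sleeping": ("[z]", "SLEEPING"),
--     "failed": ("[F]", "FAILED"),
--     "recovering": ("[R]", "FAILED"),
--     "completed": ("[*]", "DONE"),
--     "cancelled": ("[.]", "DONE"),
--     "idle": ("[~]", "OPEN"),
--     "halted": ("[X]", "OPEN"),
-- }
--
-- _COLUMNS = ("OPEN", "BLOCKED", "REVIEW", "SLEEPING", "FAILED", "DONE")
--
--
-- def _pad(text, width):
--     return text + " " * (width - len(text))
--
--
-- def _column_block(name, entries):
--     if entries:
--         rows = ["    " + e for e in entries[:10]]
--     else:
--         rows = ["    (empty)"]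
--     return ["  --- %s (%d) ---" % (name, len(entries))] + rows + [""]
--
--
-- def _frame(title, lines, width=72):
--     inner = width - 4
--     edge = "+" + "-" * (width - 2) + "+"
--     out = [edge, "| " + _pad(title, inner) + " |", "|" + "-" * (width - 2) + "|"]
--     out.extend("| " + _pad(line[:inner], inner) + " |" for line in lines)
--     out.append(edge)
--     return "\n".join(out)
--
--
-- def render_kanban(objectives, units_enabled: bool = False) -> str:
--     """Render the kanban board: tag every objective with its column, then emit per column."""
--     tagged = []
--     for o in objectives:
--         icon, col = _STATUS_INFO.get(o.get("status", ""), ("[.]", "OPEN"))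
--         entry = "%s %s.. %s %s" % (
--             icon,
--             o.get("objective_id", "")[:8],
--             _pad(o.get("severity", ""), 8),
--             o.get("goal", "")[:30],
--         )
--         tagged.append((col, entry))
--     lines = []
--     for name in _COLUMNS:
--         lines += _column_block(name, [e for c, e in tagged if c == name])
--     return _frame("KANBAN / OBJECTIVE BOARD", lines)
-- ===== Notes on version B (the rewrite author's own statement) =====
-- stated objective: alternative
-- what changed: Replaces A's two separate dicts (icon map + status->column map) and its single distribute-pass into a dict of six column lists with one merged status table giving (icon, column) per status, a tagging pass producing (column, entry) pairs, and a per-column filter over those tags in the fixed column order.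
import Mathlib
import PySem

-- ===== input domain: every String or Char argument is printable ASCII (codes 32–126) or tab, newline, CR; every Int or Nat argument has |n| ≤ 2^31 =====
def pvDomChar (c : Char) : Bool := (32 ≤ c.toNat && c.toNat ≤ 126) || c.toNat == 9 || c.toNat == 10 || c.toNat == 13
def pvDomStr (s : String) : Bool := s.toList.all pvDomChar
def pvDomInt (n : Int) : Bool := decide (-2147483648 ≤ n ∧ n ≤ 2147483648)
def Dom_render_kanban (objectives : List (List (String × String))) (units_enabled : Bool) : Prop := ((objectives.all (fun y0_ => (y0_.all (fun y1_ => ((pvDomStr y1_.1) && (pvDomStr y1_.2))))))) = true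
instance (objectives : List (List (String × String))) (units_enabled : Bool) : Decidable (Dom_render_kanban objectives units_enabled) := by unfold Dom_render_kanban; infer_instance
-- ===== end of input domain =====

-- B replaces A's two status dicts and its distribute-into-a-dict pass by one merged
-- status→(icon, column) table, a tagging pass, and a per-column filter over the tags;
-- objective: alternative decomposition (no speed claim). Return value only (no mutation).

-- ===== PORT A =====
-- A: _box with the default width 72
def pvRep (n : Nat) (c : Char) : String := String.ofList (List.replicate n c)

-- f"{s:<w}": left-justify with spaces (exact: ASCII padding, char count = len)
def pvLjust (s : String) (w : Nat) : String := s ++ pvRep (w - s.toList.length) ' '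

-- s[:n] for a nonnegative literal n (exact: Python slice with 0 ≤ n is take)
def pvTakeStr (s : String) (n : Nat) : String := String.ofList (s.toList.take n)

def pvBox (title : String) (lines : List String) : String :=
  let border := "+" ++ pvRep 70 '-' ++ "+"
  let title_line := "| " ++ pvLjust title 68 ++ " |"
  let separator := "|" ++ pvRep 70 '-' ++ "|"
  let body := lines.map (fun line => "| " ++ pvLjust (pvTakeStr line 68) 68 ++ " |")
  PySem.Str.join "\n" ([border, title_line, separator] ++ body ++ [border])

-- obj.get(k, d): first-match lookup in the association list (the convention for dict arguments)
def pvGet (obj : List (String × String)) (k d : String) : String := (PySem.Dict.mk obj).getD k d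

-- _status_icon
def pvStatusIcon (status : String) : String :=
  (PySem.Dict.mk [("active", "[+]"), ("idle", "[~]"), ("sleeping", "[z]"), ("blocked", "[!]"),
    ("halted", "[X]"), ("failed", "[F]"), ("completed", "[*]"), ("awaiting_review", "[?]"),
    ("recovering", "[R]"), ("pending", "[ ]")]).getD status "[.]"

def pvStatusMapItems : List (String × String) :=
  [("pending", "OPEN"), ("planning", "OPEN"), ("active", "OPEN"), ("blocked", "BLOCKED"),
   ("awaiting_review", "REVIEW"), ("sleeping", "SLEEPING"), ("failed", "FAILED"),
   ("recovering", "FAILED"), ("completed", "DONE"), ("cancelled", "DONE")]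

-- status_map.get(obj.get("status", ""), "OPEN")
def pvResolve (obj : List (String × String)) : String :=
  (PySem.Dict.mk pvStatusMapItems).getD (pvGet obj "status" "") "OPEN"

-- f"{icon} {obj_id}.. {severity:<8} {goal}" with obj_id[:8], goal[:30]
def pvEntry (obj : List (String × String)) : String :=
  pvStatusIcon (pvGet obj "status" "") ++ " " ++ pvTakeStr (pvGet obj "objective_id" "") 8
    ++ ".. " ++ pvLjust (pvGet obj "severity" "") 8 ++ " " ++ pvTakeStr (pvGet obj "goal" "") 30

-- the three lines a column contributes in A's inner loop: header, entries[:10] or "(empty)", ""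
def pvColLines (name : String) (entries : List String) : List String :=
  ("  --- " ++ name ++ " (" ++ PySem.Int.toStr (entries.length : Int) ++ ") ---") ::
    (if entries.isEmpty then ["    (empty)"]
     else (PySem.List.slice entries none (some 10)).map (fun e => "    " ++ e)) ++ [""]

-- A: one pass distributing each objective into a dict of six columns, then a pass over columns.items().
-- (columns[col].append(e) is Dict.modify with default []; col is always a present key.)
def render_kanban (objectives : List (List (String × String))) (units_enabled : Bool) : String :=
  let columns := objectives.foldl
    (fun d obj => d.modify (pvResolve obj) [] (fun v => v ++ [pvEntry obj]))
    (PySem.Dict.mk [("OPEN", ([] : List String)), ("BLOCKED", []), ("REVIEW", []),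
      ("SLEEPING", []), ("FAILED", []), ("DONE", [])])
  let lines := columns.items.foldl (fun acc p => acc ++ pvColLines p.1 p.2) []
  pvBox "KANBAN / OBJECTIVE BOARD" lines

-- ===== PORT B =====
-- B's merged table: _STATUS_INFO.get(status, ("[.]", "OPEN"))
def bInfo (status : String) : String × String :=
  (PySem.Dict.mk [("pending", ("[ ]", "OPEN")), ("planning", ("[.]", "OPEN")),
    ("active", ("[+]", "OPEN")), ("blocked", ("[!]", "BLOCKED")),
    ("awaiting_review", ("[?]", "REVIEW")), ("sleeping", ("[z]", "SLEEPING")),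
    ("failed", ("[F]", "FAILED")), ("recovering", ("[R]", "FAILED")),
    ("completed", ("[*]", "DONE")), ("cancelled", ("[.]", "DONE")),
    ("idle", ("[~]", "OPEN")), ("halted", ("[X]", "OPEN"))]).getD status ("[.]", "OPEN")

def bColumns : List String := ["OPEN", "BLOCKED", "REVIEW", "SLEEPING", "FAILED", "DONE"]

-- _pad(text, width) = text + " " * (width - len(text))
def bPad (text : String) (width : Nat) : String :=
  text ++ String.ofList (List.replicate (width - text.toList.length) ' ')

-- line[:inner] (nonnegative literal bound)
def bCut (s : String) (n : Nat) : String := String.ofList (s.toList.take n)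

-- o.get(k, "") on the association list
def bGet (o : List (String × String)) (k : String) : String := (PySem.Dict.mk o).getD k ""

-- _column_block(name, entries)
def bBlock (name : String) (entries : List String) : List String :=
  let rows := if entries.isEmpty then ["    (empty)"]
              else (PySem.List.slice entries none (some 10)).map (fun e => "    " ++ e)
  ["  --- " ++ name ++ " (" ++ PySem.Int.toStr (entries.length : Int) ++ ") ---"] ++ rows ++ [""]

-- _frame(title, lines) with the default width 72 (inner = 68)
def bFrame (title : String) (lines : List String) : String :=
  let edge := "+" ++ String.ofList (List.replicate 70 '-') ++ "+"
  PySem.Str.join "\n"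
    (edge :: ("| " ++ bPad title 68 ++ " |") ::
      ("|" ++ String.ofList (List.replicate 70 '-') ++ "|") ::
      (lines.map (fun line => "| " ++ bPad (bCut line 68) 68 ++ " |") ++ [edge]))

-- B: tag each objective with (column, entry) via the merged table, then per-column filter.
def render_kanban_alt (objectives : List (List (String × String))) (units_enabled : Bool) : String :=
  let tagged := objectives.foldl (fun acc o =>
    let info := bInfo (bGet o "status")
    acc ++ [(info.2, info.1 ++ " " ++ bCut (bGet o "objective_id") 8 ++ ".. "
                      ++ bPad (bGet o "severity") 8 ++ " " ++ bCut (bGet o "goal") 30)]) []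
  let lines := bColumns.foldl (fun acc name =>
    acc ++ bBlock name ((tagged.filter (fun p => p.1 == name)).map (·.2))) []
  bFrame "KANBAN / OBJECTIVE BOARD" lines

-- ===== PRECONDITION & SPEC =====
def Spec_render_kanban (objectives : List (List (String × String))) (units_enabled : Bool) (out : String) : Prop := out = render_kanban_alt objectives units_enabled
instance (objectives : List (List (String × String))) (units_enabled : Bool) (out : String) : Decidable (Spec_render_kanban objectives units_enabled out) := by unfold Spec_render_kanban; infer_instance

-- ===== CLAIM (what is proved, stated in full; the proofs are below) =====
def Claim_equal_render_kanban : Prop := ∀ (objectives : List (List (String × String))) (units_enabled : Bool), Dom_render_kanban objectives units_enabled → Spec_render_kanban objectives units_enabled (render_kanban objectives units_enabled)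

-- ===== LEMMAS AND PROOFS =====

-- B's merged table agrees pointwise with A's two separate lookups
theorem bInfo_eq (s : String) :
    bInfo s = (pvStatusIcon s, (PySem.Dict.mk pvStatusMapItems).getD s "OPEN") := by
  by_cases h1 : s = "pending";         · subst h1; rfl
  by_cases h2 : s = "planning";        · subst h2; rfl
  by_cases h3 : s = "active";          · subst h3; rfl
  by_cases h4 : s = "blocked";         · subst h4; rfl
  by_cases h5 : s = "awaiting_review"; · subst h5; rfl
  by_cases h6 : s = "sleeping";        · subst h6; rfl
  by_cases h7 : s = "failed";          · subst h7; rfl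
  by_cases h8 : s = "recovering";      · subst h8; rfl
  by_cases h9 : s = "completed";       · subst h9; rfl
  by_cases h10 : s = "cancelled";      · subst h10; rfl
  by_cases h11 : s = "idle";           · subst h11; rfl
  by_cases h12 : s = "halted";         · subst h12; rfl
  have e1 : ("pending" == s) = false := beq_eq_false_iff_ne.mpr (Ne.symm h1)
  have e2 : ("planning" == s) = false := beq_eq_false_iff_ne.mpr (Ne.symm h2)
  have e3 : ("active" == s) = false := beq_eq_false_iff_ne.mpr (Ne.symm h3)
  have e4 : ("blocked" == s) = false := beq_eq_false_iff_ne.mpr (Ne.symm h4)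
  have e5 : ("awaiting_review" == s) = false := beq_eq_false_iff_ne.mpr (Ne.symm h5)
  have e6 : ("sleeping" == s) = false := beq_eq_false_iff_ne.mpr (Ne.symm h6)
  have e7 : ("failed" == s) = false := beq_eq_false_iff_ne.mpr (Ne.symm h7)
  have e8 : ("recovering" == s) = false := beq_eq_false_iff_ne.mpr (Ne.symm h8)
  have e9 : ("completed" == s) = false := beq_eq_false_iff_ne.mpr (Ne.symm h9)
  have e10 : ("cancelled" == s) = false := beq_eq_false_iff_ne.mpr (Ne.symm h10)
  have e11 : ("idle" == s) = false := beq_eq_false_iff_ne.mpr (Ne.symm h11)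
  have e12 : ("halted" == s) = false := beq_eq_false_iff_ne.mpr (Ne.symm h12)
  simp [bInfo, pvStatusIcon, pvStatusMapItems, PySem.Dict.getD, PySem.Dict.get?, List.find?,
    e1, e2, e3, e4, e5, e6, e7, e8, e9, e10, e11, e12]

-- a first-match lookup returns the default or one of the stored values
theorem pv_getD_mem {κ ν : Type} [BEq κ] (l : List (κ × ν)) (k : κ) (dflt : ν) :
    (PySem.Dict.mk l).getD k dflt = dflt ∨ (PySem.Dict.mk l).getD k dflt ∈ l.map (·.2) := by
  simp only [PySem.Dict.getD, PySem.Dict.get?]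
  cases h : List.find? (fun p => p.1 == k) l with
  | none => left; rfl
  | some p =>
      right
      simp only [Option.map_some, Option.getD_some]
      exact List.mem_map_of_mem (List.mem_of_find?_eq_some h)

theorem pvResolve_mem (obj : List (String × String)) : pvResolve obj ∈ bColumns := by
  unfold pvResolve bColumns
  have hm := pv_getD_mem pvStatusMapItems (pvGet obj "status" "") "OPEN"
  unfold pvStatusMapItems at hm ⊢
  rcases hm with h | h
  · rw [h]; decide
  · simp only [List.map_cons, List.map_nil, List.mem_cons, List.not_mem_nil, or_false] at h
    rcases h with h | h | h | h | h | h | h | h | h | h <;> (rw [h]; decide)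

theorem pv_set_update_of_subset (xs : List String) (s : PySem.Set String)
    (h : ∀ x ∈ xs, x ∈ s) : PySem.Set.update s xs = s := by
  induction xs generalizing s with
  | nil => rfl
  | cons x t ih => simp_all [PySem.Set.update, PySem.Set.add, List.foldl_cons]

-- items of a dict with known nodup keys and known lookups
theorem pv_items_eq {κ ν : Type} [BEq κ] [LawfulBEq κ] (l : List (κ × ν)) (ks : List κ)
    (f : κ → ν) (dflt : ν) (hk : (PySem.Dict.mk l).keys = ks) (hnd : ks.Nodup)
    (hv : ∀ k ∈ ks, (PySem.Dict.mk l).getD k dflt = f k) :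
    l = ks.map (fun k => (k, f k)) := by
  induction l generalizing ks with
  | nil =>
      simp only [PySem.Dict.keys, List.map_nil] at hk
      subst hk; rfl
  | cons p rest ih =>
      obtain ⟨k, v⟩ := p
      simp only [PySem.Dict.keys, List.map_cons] at hk
      subst hk
      have hnd' : (List.map (fun x => x.1) rest).Nodup := hnd.of_cons
      have hknot : k ∉ List.map (fun x => x.1) rest := (List.nodup_cons.mp hnd).1
      have hhead : f k = v := by
        have := hv k (List.mem_cons_self ..)
        simp only [PySem.Dict.getD, PySem.Dict.get?, List.find?_cons, BEq.rfl] at this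
        simpa using this.symm
      have htail : rest = (List.map (fun x => x.1) rest).map (fun k => (k, f k)) := by
        apply ih _ rfl hnd'
        intro k' hk'
        have hne : (k == k') = false := by
          rcases List.mem_map.mp hk' with ⟨q, hq, rfl⟩
          exact beq_eq_false_iff_ne.mpr (fun hEq => hknot (hEq ▸ hk'))
        have := hv k' (List.mem_cons_of_mem _ hk')
        simpa only [PySem.Dict.getD, PySem.Dict.get?, List.find?_cons, hne] using this
      simp only [List.map_cons, hhead, ← htail]

-- A's lines list, characterised column-by-column
theorem pv_lines_eq (objectives : List (List (String × String))) :
    (objectives.foldl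
        (fun d obj => d.modify (pvResolve obj) [] (fun v => v ++ [pvEntry obj]))
        (PySem.Dict.mk [("OPEN", ([] : List String)), ("BLOCKED", []), ("REVIEW", []),
          ("SLEEPING", []), ("FAILED", []), ("DONE", [])])).items.foldl
      (fun acc p => acc ++ pvColLines p.1 p.2) []
    = bColumns.flatMap (fun col =>
        pvColLines col ((objectives.filter (fun o => pvResolve o == col)).map pvEntry)) := by
  set d0 : PySem.Dict String (List String) :=
    PySem.Dict.mk [("OPEN", ([] : List String)), ("BLOCKED", []), ("REVIEW", []),
      ("SLEEPING", []), ("FAILED", []), ("DONE", [])] with hd0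
  have hpairs : objectives.foldl
      (fun d obj => d.modify (pvResolve obj) [] (fun v => v ++ [pvEntry obj])) d0
      = (objectives.map (fun o => (pvResolve o, pvEntry o))).foldl
          (fun d p => d.modify p.1 [] (fun v => v ++ [p.2])) d0 := by
    rw [List.foldl_map]
  have hkeys : ((objectives.map (fun o => (pvResolve o, pvEntry o))).foldl
      (fun d p => d.modify p.1 [] (fun v => v ++ [p.2])) d0).keys = bColumns := by
    rw [List.foldl_map]
    rw [PySem.Dict.keys_foldl_modify_key objectives pvResolve []
      (fun _ obj => (fun v => v ++ [pvEntry obj])) d0]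
    have hk0 : d0.keys = bColumns := by rw [hd0]; rfl
    rw [hk0]
    exact pv_set_update_of_subset _ _ (fun x hx => by
      rcases List.mem_map.mp hx with ⟨o, _, rfl⟩; exact pvResolve_mem o)
  have hgetD : ∀ c ∈ bColumns,
      ((objectives.map (fun o => (pvResolve o, pvEntry o))).foldl
        (fun d p => d.modify p.1 [] (fun v => v ++ [p.2])) d0).getD c []
      = (objectives.filter (fun o => pvResolve o == c)).map pvEntry := by
    intro c _
    rw [PySem.Dict.getD_foldl_modify_append]
    have h0 : d0.getD c [] = [] := by
      rcases pv_getD_mem _ c ([] : List String) with h | h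
      · exact h
      · simpa using h
    rw [h0, List.filter_map, List.map_map]
    rfl
  rw [hpairs]
  set dF := (objectives.map (fun o => (pvResolve o, pvEntry o))).foldl
      (fun d p => d.modify p.1 [] (fun v => v ++ [p.2])) d0 with hdF
  obtain ⟨l⟩ := dF
  have hitems : l = bColumns.map
      (fun c => (c, (objectives.filter (fun o => pvResolve o == c)).map pvEntry)) :=
    pv_items_eq l bColumns _ [] hkeys (by decide) hgetD
  show l.foldl (fun acc p => acc ++ pvColLines p.1 p.2) [] = _
  rw [hitems, PySem.List.foldl_append_eq_flatMap, List.nil_append, List.flatMap_map]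

-- B's tag-then-filter lines coincide with that characterisation
theorem b_lines_eq (objectives : List (List (String × String))) :
    bColumns.foldl (fun acc name =>
      acc ++ bBlock name
        (((objectives.foldl (fun acc o =>
            let info := bInfo (bGet o "status")
            acc ++ [(info.2, info.1 ++ " " ++ bCut (bGet o "objective_id") 8 ++ ".. "
                      ++ bPad (bGet o "severity") 8 ++ " " ++ bCut (bGet o "goal") 30)]) []).filter
            (fun p => p.1 == name)).map (·.2))) []
    = bColumns.flatMap (fun col =>
        pvColLines col ((objectives.filter (fun o => pvResolve o == col)).map pvEntry)) := by
  have htag : (objectives.foldl (fun acc o =>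
      let info := bInfo (bGet o "status")
      acc ++ [(info.2, info.1 ++ " " ++ bCut (bGet o "objective_id") 8 ++ ".. "
                ++ bPad (bGet o "severity") 8 ++ " " ++ bCut (bGet o "goal") 30)]) [])
      = objectives.map (fun o => (pvResolve o, pvEntry o)) := by
    rw [PySem.List.foldl_append_singleton_eq_map, List.nil_append]
    apply List.map_congr_left
    intro o _
    rw [bInfo_eq (bGet o "status")]
    rfl
  rw [htag, PySem.List.foldl_append_eq_flatMap, List.nil_append]
  apply List.flatMap_congr
  intro name _
  have hfil : ((objectives.map (fun o => (pvResolve o, pvEntry o))).filter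
      (fun p => p.1 == name)).map (·.2)
      = (objectives.filter (fun o => pvResolve o == name)).map pvEntry := by
    rw [List.filter_map, List.map_map]; rfl
  rw [hfil]
  rfl

-- ===== VERDICT (by name: the statement is the Claim_ definition above) =====
theorem render_kanban_spec : Claim_equal_render_kanban := by
  intro objectives units_enabled _
  show render_kanban objectives units_enabled = render_kanban_alt objectives units_enabled
  unfold render_kanban render_kanban_alt
  simp only [pv_lines_eq objectives, ← b_lines_eq objectives]
  rfl
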